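-- pv_equiv track=rewrite | github.com/pypi-data/pypi-mirror-382 | packages/trackignore/trackignore-0.1.2.tar.gz/trackignore-0.1.2/src/trackignore/cli.py | _classify_sync_targets
-- ===== SOURCE A (Python) =====
-- def _classify_sync_targets(patterns: list[str]) -> tuple[list[str], list[str], list[str]]:
--     directories: list[str] = []
--     wildcard_patterns: list[str] = []
--     file_patterns: list[str] = []
--
--     for pattern in patterns:
--         if pattern.endswith("/"):
--             trimmed = pattern.rstrip("/")
--             if _contains_wildcards(trimmed):
--                 wildcard_patterns.append(pattern)
--                 continue
--             directories.append(pattern)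
--         else:
--             file_patterns.append(pattern)
--     return directories, wildcard_patterns, file_patterns
--
-- def _contains_wildcards(value: str) -> bool:
--     return any(ch in value for ch in {"*", "?", "["})
-- ===== SOURCE B (Python) =====
-- def _classify_sync_targets(patterns: list[str]) -> tuple[list[str], list[str], list[str]]:
--     def is_dir_like(p: str) -> bool:
--         return p.endswith("/")
--
--     def has_wildcards(p: str) -> bool:
--         return any(c in "*?[" for c in p.rstrip("/"))
--
--     directories = [p for p in patterns if is_dir_like(p) and not has_wildcards(p)]
--     wildcard_patterns = [p for p in patterns if is_dir_like(p) and has_wildcards(p)]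
--     file_patterns = [p for p in patterns if not is_dir_like(p)]
--     return directories, wildcard_patterns, file_patterns
-- ===== Notes on version B (the rewrite author's own statement) =====
-- stated objective: alternative
-- what changed: Replaces A's single classifying loop over a triple of accumulators with three independent filtered comprehensions over patterns (one per output list), using mutually exclusive predicates; the wildcard test scans the string's characters against "*?[" instead of three substring searches.
import Mathlib
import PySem

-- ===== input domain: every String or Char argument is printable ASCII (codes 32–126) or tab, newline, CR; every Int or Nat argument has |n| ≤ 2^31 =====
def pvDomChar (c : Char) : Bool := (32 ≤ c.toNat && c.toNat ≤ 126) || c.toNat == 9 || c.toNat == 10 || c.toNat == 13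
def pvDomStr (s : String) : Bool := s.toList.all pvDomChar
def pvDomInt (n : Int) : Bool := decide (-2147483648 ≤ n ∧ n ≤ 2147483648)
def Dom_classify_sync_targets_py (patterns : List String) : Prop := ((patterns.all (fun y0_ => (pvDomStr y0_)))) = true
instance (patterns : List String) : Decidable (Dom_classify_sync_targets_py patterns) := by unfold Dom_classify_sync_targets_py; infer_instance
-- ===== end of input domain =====

-- B replaces A's single classifying loop with three independent filtered passes (alternative decomposition, same cost).


-- ===== PORT A =====
-- hand port of s.rstrip("/") (exact: removes exactly the trailing '/' characters)
def pyRstripSlash (s : String) : String :=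
  String.ofList ((s.toList.reverse.dropWhile (fun c => c == '/')).reverse)

-- port of _contains_wildcards: any(ch in value for ch in {"*", "?", "["})
def containsWildcards (value : String) : Bool :=
  PySem.Str.isIn "*" value || PySem.Str.isIn "?" value || PySem.Str.isIn "[" value

def classify_sync_targets_py (patterns : List String) : List String × List String × List String :=
  patterns.foldl
    (fun acc pattern =>
      let (directories, wildcard_patterns, file_patterns) := acc
      if PySem.Str.endswith pattern "/" then
        let trimmed := pyRstripSlash pattern
        if containsWildcards trimmed then
          (directories, wildcard_patterns ++ [pattern], file_patterns)
        else
          (directories ++ [pattern], wildcard_patterns, file_patterns)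
      else
        (directories, wildcard_patterns, file_patterns ++ [pattern]))
    ([], [], [])

-- ===== PORT B =====
def isDirLike (p : String) : Bool := PySem.Str.endswith p "/"

-- any(c in "*?[" for c in p.rstrip("/"))
def hasWildcards (p : String) : Bool :=
  (pyRstripSlash p).toList.any (fun c => c == '*' || c == '?' || c == '[')

def classify_sync_targets_py_alt (patterns : List String) : List String × List String × List String :=
  ( patterns.filter (fun p => isDirLike p && !hasWildcards p)
  , patterns.filter (fun p => isDirLike p && hasWildcards p)
  , patterns.filter (fun p => !isDirLike p) )

-- ===== PRECONDITION & SPEC =====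
def Spec_classify_sync_targets_py (patterns : List String) (out : List String × List String × List String) : Prop := out = classify_sync_targets_py_alt patterns
instance (patterns : List String) (out : List String × List String × List String) : Decidable (Spec_classify_sync_targets_py patterns out) := by unfold Spec_classify_sync_targets_py; infer_instance

-- ===== CLAIM (what is proved, stated in full; the proofs are below) =====
def Claim_equal_classify_sync_targets_py : Prop := ∀ (patterns : List String), Dom_classify_sync_targets_py patterns → Spec_classify_sync_targets_py patterns (classify_sync_targets_py patterns)

-- ===== LEMMAS AND PROOFS =====
-- the three-substring membership test of A equals B's character scan
theorem containsWildcards_eq (s : String) :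
    containsWildcards s = s.toList.any (fun c => c == '*' || c == '?' || c == '[') := by
  have h1 : ("*" : String).toList = ['*'] := rfl
  have h2 : ("?" : String).toList = ['?'] := rfl
  have h3 : ("[" : String).toList = ['['] := rfl
  unfold containsWildcards
  rw [Bool.eq_iff_iff]
  simp only [Bool.or_eq_true, PySem.Str.isIn_iff_infix, h1, h2, h3,
    List.singleton_infix_iff, List.any_eq_true, beq_iff_eq]
  aesop

theorem hasWildcards_eq' (p : String) :
    containsWildcards (pyRstripSlash p) = hasWildcards p := by
  rw [containsWildcards_eq]; rfl

def stepA (acc : List String × List String × List String) (pattern : String) :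
    List String × List String × List String :=
  if isDirLike pattern then
    if hasWildcards pattern then (acc.1, acc.2.1 ++ [pattern], acc.2.2)
    else (acc.1 ++ [pattern], acc.2.1, acc.2.2)
  else (acc.1, acc.2.1, acc.2.2 ++ [pattern])

theorem stepA_eq :
    (fun (acc : List String × List String × List String) (pattern : String) =>
      let (directories, wildcard_patterns, file_patterns) := acc
      if PySem.Str.endswith pattern "/" then
        let trimmed := pyRstripSlash pattern
        if containsWildcards trimmed then
          (directories, wildcard_patterns ++ [pattern], file_patterns)
        else
          (directories ++ [pattern], wildcard_patterns, file_patterns)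
      else
        (directories, wildcard_patterns, file_patterns ++ [pattern]))
    = stepA := by
  funext acc pattern
  obtain ⟨d, w, f⟩ := acc
  simp only [stepA, isDirLike, hasWildcards_eq']

theorem loop_eq (l : List String) (d w f : List String) :
    l.foldl stepA (d, w, f)
    = ( d ++ l.filter (fun p => isDirLike p && !hasWildcards p)
      , w ++ l.filter (fun p => isDirLike p && hasWildcards p)
      , f ++ l.filter (fun p => !isDirLike p) ) := by
  induction l generalizing d w f with
  | nil => simp
  | cons p t ih =>
    simp only [List.foldl_cons, List.filter_cons, stepA]
    by_cases h1 : isDirLike p <;> by_cases h2 : hasWildcards p <;> simp [h1, h2, ih]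

-- ===== VERDICT (by name: the statement is the Claim_ definition above) =====
theorem classify_sync_targets_py_spec : Claim_equal_classify_sync_targets_py := by
  intro patterns _
  unfold Spec_classify_sync_targets_py classify_sync_targets_py classify_sync_targets_py_alt
  rw [stepA_eq, loop_eq]
  simp
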